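-- pv_equiv track=rewrite | github.com/Takuma-Ikeda/other-LeetCode | src/answer/generate_a_string_with_characters_that_have_odd_counts.py | generateTheString
-- ===== SOURCE A (Python) =====
-- def generateTheString(n: int) -> str:
--     result = []
--
--     if n % 2 == 0:
--         for i in range(n):
--             if i == n - 1:
--                 result.append('b')
--                 break
--             else:
--                 result.append('a')
--     else:
--         for i in range(n):
--             result.append('a')
--
--     return ''.join(result)
-- ===== SOURCE B (Python) =====
-- def generateTheString(n: int) -> str:
--     if n <= 0:
--         return ''
--     return 'a' * n if n % 2 == 1 else 'a' * (n - 1) + 'b'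
-- ===== Notes on version B (the rewrite author's own statement) =====
-- stated objective: simpler
-- what changed: Replaces the two index loops with a list accumulator and a per-index break branch by a direct closed-form string expression ('a'*n or 'a'*(n-1)+'b').
import Mathlib
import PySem

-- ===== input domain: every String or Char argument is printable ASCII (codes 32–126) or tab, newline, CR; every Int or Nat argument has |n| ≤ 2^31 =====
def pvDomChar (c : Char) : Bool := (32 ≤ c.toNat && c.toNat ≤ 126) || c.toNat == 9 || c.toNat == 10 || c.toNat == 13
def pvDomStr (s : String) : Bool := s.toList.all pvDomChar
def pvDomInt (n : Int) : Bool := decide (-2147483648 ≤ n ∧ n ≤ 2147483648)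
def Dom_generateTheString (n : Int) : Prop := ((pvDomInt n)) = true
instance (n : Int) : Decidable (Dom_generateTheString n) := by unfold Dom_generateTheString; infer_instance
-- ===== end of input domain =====

-- B replaces A's two index loops with a break branch by a closed-form string expression; same O(n) result.


-- ===== PORT A =====
-- the even-branch loop, with its break modelled by returning early
def pvLoopA : List Int → Int → List Char → List Char
  | [], _, acc => acc
  | i :: rest, n, acc =>
      if i = n - 1 then acc ++ ['b']
      else pvLoopA rest n (acc ++ ['a'])

def generateTheString (n : Int) : String :=
  let result : List Char :=
    if PySem.Int.mod n 2 = 0 then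
      pvLoopA (PySem.List.pyRange 0 n 1) n []
    else
      (PySem.List.pyRange 0 n 1).foldl (fun acc _ => acc ++ ['a']) []
  String.mk result

-- ===== PORT B =====
def generateTheString_alt (n : Int) : String :=
  if n ≤ 0 then ""
  else if PySem.Int.mod n 2 = 1 then String.mk (List.replicate n.toNat 'a')
  else String.mk (List.replicate (n - 1).toNat 'a' ++ ['b'])

-- ===== PRECONDITION & SPEC =====
def Spec_generateTheString (n : Int) (out : String) : Prop := out = generateTheString_alt n
instance (n : Int) (out : String) : Decidable (Spec_generateTheString n out) := by unfold Spec_generateTheString; infer_instance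

-- ===== CLAIM (what is proved, stated in full; the proofs are below) =====
def Claim_equal_generateTheString : Prop := ∀ (n : Int), Dom_generateTheString n → Spec_generateTheString n (generateTheString n)

-- ===== LEMMAS AND PROOFS =====

lemma pvFoldA (l : List Int) : ∀ (acc : List Char),
    l.foldl (fun acc _ => acc ++ ['a']) acc = acc ++ List.replicate l.length 'a' := by
  induction l with
  | nil => simp
  | cons x xs ih =>
      intro acc
      simp only [List.foldl_cons, List.length_cons, ih, List.replicate_succ]
      simp

lemma pvLoopA_eq (n : Int) : ∀ (k : Nat) (a : Int) (acc : List Char),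
    n - a = k → 0 < k →
    pvLoopA (PySem.List.pyRange a n 1) n acc = acc ++ List.replicate (k - 1) 'a' ++ ['b'] := by
  intro k
  induction k with
  | zero => intro a acc _ h; omega
  | succ k ih =>
      intro a acc hk _
      have hlt : a < n := by omega
      rw [PySem.List.pyRange_one_cons hlt]
      by_cases h : a = n - 1
      · have : k = 0 := by omega
        simp [pvLoopA, h, this]
      · have hk1 : 0 < k := by omega
        simp only [pvLoopA, if_neg h]
        rw [ih (a + 1) (acc ++ ['a']) (by omega) hk1]
        have : List.replicate (k + 1 - 1) 'a' = 'a' :: List.replicate (k - 1) 'a' := by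
          have : k + 1 - 1 = (k - 1) + 1 := by omega
          rw [this, List.replicate_succ]
        rw [this]
        simp

-- ===== VERDICT (by name: the statement is the Claim_ definition above) =====
theorem generateTheString_spec : Claim_equal_generateTheString := by
  intro n _
  unfold Spec_generateTheString generateTheString generateTheString_alt
  by_cases hpos : n ≤ 0
  · have hnil : PySem.List.pyRange 0 n 1 = [] := PySem.List.pyRange_one_eq_nil (by omega)
    simp [hnil, pvLoopA, hpos]
    rfl
  · have h2 : (0:Int) < 2 := by omega
    rw [PySem.Int.mod_eq_emod_of_pos h2]
    have hmod := Int.emod_two_eq n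
    by_cases he : n % 2 = 0
    · have hne1 : ¬ (n % 2 = 1) := by omega
      simp only [he, if_neg hpos, if_neg hne1, if_pos]
      rw [pvLoopA_eq n n.toNat 0 [] (by omega) (by omega)]
      have : (n - 1).toNat = n.toNat - 1 := by omega
      simp [this]
    · have ho : n % 2 = 1 := by omega
      simp only [ho, if_neg hpos, if_pos, if_neg he]
      rw [pvFoldA]
      have : (PySem.List.pyRange 0 n 1).length = n.toNat := by
        rw [PySem.List.length_pyRange_one]; omega
      simp [this]
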